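-- pv_equiv track=rewrite | github.com/slavah8/leetcode | 3855-make-a-positive-array/3855-make-a-positive-array.py | makeArrayPositive
-- ===== SOURCE A (Python) =====
-- from typing import List
--
-- def makeArrayPositive(nums: List[int]) -> int:
--     n = len(nums)
--     prefix = [0] * (n + 1)
--
--     for i, x in enumerate(nums):
--         prefix[i + 1] = prefix[i] + x
--
--     bad = []
--     for L in (3, 4, 5):
--         for i in range(n - L + 1):
--             if prefix[i + L] - prefix[i] <= 0:
--                 bad.append((i, i + L)) # (L, R)
--     if not bad:
--         return 0
--
--     bad.sort(key = lambda x: x[1])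
--     INF = 10 ** 10
--     last = INF
--     ops = 0
--     for L, R in bad:
--         if not (L <= last < R):
--             ops += 1
--             last = R - 1
--     return ops
-- ===== SOURCE B (Python) =====
-- from typing import List
--
-- # One left-to-right greedy pass: right endpoints come out already in increasing
-- # order, so no interval list and no sort are needed.
--
-- def makeArrayPositive(nums: List[int]) -> int:
--     n = len(nums)
--     p = [0]
--     s = 0
--     for x in nums:
--         s += x
--         p.append(s)
--     ops = 0
--     covered = -1  # index of the most recently fixed position; -1 = none yet
--     for r in range(3, n + 1):
--         pr = p[r]
--         if ((covered < r - 3 and pr - p[r - 3] <= 0)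
--                 or (r >= 4 and covered < r - 4 and pr - p[r - 4] <= 0)
--                 or (r >= 5 and covered < r - 5 and pr - p[r - 5] <= 0)):
--             ops += 1
--             covered = r - 1
--     return ops
-- ===== Notes on version B (the rewrite author's own statement) =====
-- stated objective: faster
-- what changed: A collects all bad length-3..5 windows into a list, sorts it by right endpoint, then runs the stabbing greedy; B does one left-to-right pass over right endpoints (which are already increasing), running the greedy inline with no interval list and no sort. Pre_ only excludes physically unrealizable lists of more than 10**10 elements, where A's 'last = 10**10' sentinel could wrongly mark the first bad window as already covered.
import Mathlib
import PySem

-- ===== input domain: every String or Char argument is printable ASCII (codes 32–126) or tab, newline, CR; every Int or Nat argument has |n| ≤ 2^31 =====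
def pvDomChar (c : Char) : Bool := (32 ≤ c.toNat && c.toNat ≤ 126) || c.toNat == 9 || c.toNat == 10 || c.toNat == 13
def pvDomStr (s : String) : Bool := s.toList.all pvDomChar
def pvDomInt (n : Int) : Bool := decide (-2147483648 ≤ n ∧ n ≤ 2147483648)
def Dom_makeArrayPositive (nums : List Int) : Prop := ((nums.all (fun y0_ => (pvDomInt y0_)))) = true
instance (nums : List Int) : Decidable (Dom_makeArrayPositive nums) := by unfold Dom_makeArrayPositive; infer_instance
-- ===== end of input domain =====

-- B replaces A's collect-sort-greedy by a single left-to-right greedy pass (right endpoints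
-- are generated in increasing order, so no interval list and no sort are needed).


-- ===== PORT A =====
def makeArrayPositive (nums : List Int) : Int :=
  let n : Int := PySem.List.len nums
  let prefix1 : List Int :=
    (PySem.List.enumerate nums 0).foldl
      (fun p ix => PySem.List.pySetD p (ix.1 + 1) (PySem.List.pyGetD p ix.1 0 + ix.2))
      (List.replicate (nums.length + 1) 0)
  let bad : List (Int × Int) :=
    ([3, 4, 5] : List Int).foldl
      (fun acc L =>
        (PySem.List.pyRange 0 (n - L + 1) 1).foldl
          (fun acc2 i =>
            if PySem.List.pyGetD prefix1 (i + L) 0 - PySem.List.pyGetD prefix1 i 0 ≤ 0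
            then acc2 ++ [(i, i + L)] else acc2)
          acc)
      []
  if bad = [] then 0
  else
    let sortedBad := PySem.List.sorted bad (fun x => x.2) false
    let res :=
      sortedBad.foldl
        (fun (st : Int × Int) e =>
          if ¬ (e.1 ≤ st.1 ∧ st.1 < e.2) then (e.2 - 1, st.2 + 1) else st)
        (10 ^ 10, 0)
    res.2

-- ===== PORT B =====
def makeArrayPositive_alt (nums : List Int) : Int :=
  let n : Int := PySem.List.len nums
  let ps : List Int × Int := nums.foldl (fun p x => (p.1 ++ [p.2 + x], p.2 + x)) ([0], 0)
  let p := ps.1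
  let res :=
    (PySem.List.pyRange 3 (n + 1) 1).foldl
      (fun (st : Int × Int) r =>
        let pr := PySem.List.pyGetD p r 0
        if (st.1 < r - 3 ∧ pr - PySem.List.pyGetD p (r - 3) 0 ≤ 0)
           ∨ (r ≥ 4 ∧ st.1 < r - 4 ∧ pr - PySem.List.pyGetD p (r - 4) 0 ≤ 0)
           ∨ (r ≥ 5 ∧ st.1 < r - 5 ∧ pr - PySem.List.pyGetD p (r - 5) 0 ≤ 0)
        then (r - 1, st.2 + 1) else st)
      (-1, 0)
  res.2

-- ===== PRECONDITION & SPEC =====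
-- Pre_ excludes (physically unrealizable) lists of more than 10**10 elements: beyond that
-- bound A's sentinel 'last = 10**10' can fall inside a bad window, so A's greedy would
-- silently treat the first bad window as already fixed.
def Pre_makeArrayPositive (nums : List Int) : Prop := (nums.length : Int) ≤ 10 ^ 10
instance (nums : List Int) : Decidable (Pre_makeArrayPositive nums) := by
  unfold Pre_makeArrayPositive; infer_instance
def pvWitness_makeArrayPositive : List Int := [1, -2, 3, 1, 1]

def Spec_makeArrayPositive (nums : List Int) (out : Int) : Prop := out = makeArrayPositive_alt nums
instance (nums : List Int) (out : Int) : Decidable (Spec_makeArrayPositive nums out) := by unfold Spec_makeArrayPositive; infer_instance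

-- ===== CLAIM (what is proved, stated in full; the proofs are below) =====
def Claim_equal_makeArrayPositive : Prop := ∀ (nums : List Int), Dom_makeArrayPositive nums → Pre_makeArrayPositive nums → Spec_makeArrayPositive nums (makeArrayPositive nums)

-- ===== LEMMAS AND PROOFS =====

-- canonical prefix-sum list: preList s xs = [s, s+x0, s+x0+x1, ...]
def preList : Int → List Int → List Int
  | s, [] => [s]
  | s, x :: xs => s :: preList (s + x) xs

-- A's greedy step (st = (last, ops), e = (L, R) in A's naming, i.e. (left, right))
def gstep (st : Int × Int) (e : Int × Int) : Int × Int :=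
  if ¬ (e.1 ≤ st.1 ∧ st.1 < e.2) then (e.2 - 1, st.2 + 1) else st

-- window (r-L, r] has non-positive sum, read off the prefix list P
def badAt (P : List Int) (L r : Int) : Bool :=
  decide (PySem.List.pyGetD P r 0 - PySem.List.pyGetD P (r - L) 0 ≤ 0)

-- the bad intervals with right endpoint r
def grp (P : List Int) (r : Int) : List (Int × Int) :=
  ([3, 4, 5] : List Int).filterMap
    (fun L => if 0 ≤ r - L ∧ badAt P L r then some (r - L, r) else none)

-- A's per-length block, reindexed by right endpoint
def blk (P : List Int) (b L : Int) : List (Int × Int) :=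
  ((PySem.List.pyRange L b 1).filter (fun r => badAt P L r)).map (fun r => (r - L, r))

-- all bad intervals grouped by right endpoint, in increasing order
def mergedL (P : List Int) (b : Int) : List (Int × Int) :=
  (PySem.List.pyRange 3 b 1).flatMap (grp P)

-- B's greedy step
def bstep (P : List Int) (st : Int × Int) (r : Int) : Int × Int :=
  if (st.1 < r - 3 ∧ PySem.List.pyGetD P r 0 - PySem.List.pyGetD P (r - 3) 0 ≤ 0)
     ∨ (r ≥ 4 ∧ st.1 < r - 4 ∧ PySem.List.pyGetD P r 0 - PySem.List.pyGetD P (r - 4) 0 ≤ 0)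
     ∨ (r ≥ 5 ∧ st.1 < r - 5 ∧ PySem.List.pyGetD P r 0 - PySem.List.pyGetD P (r - 5) 0 ≤ 0)
  then (r - 1, st.2 + 1) else st

-- the single optional bad interval of length L ending at r
def elt (P : List Int) (r L : Int) : List (Int × Int) :=
  if 0 ≤ r - L ∧ badAt P L r then [(r - L, r)] else []

theorem prefB_eq (xs : List Int) : ∀ (acc : List Int) (s : Int),
    (xs.foldl (fun (p : List Int × Int) x => (p.1 ++ [p.2 + x], p.2 + x)) (acc ++ [s], s)).1
      = acc ++ preList s xs := by
  induction xs with
  | nil => intro acc s; simp [preList]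
  | cons x xs ih =>
    intro acc s
    simp only [List.foldl_cons]
    have := ih (acc ++ [s]) (s + x)
    simp only [List.append_assoc] at this ⊢
    simpa [preList] using this


theorem prefA_eq (xs : List Int) : ∀ (acc : List Int) (s : Int),
    (PySem.List.enumerate xs (acc.length : Int)).foldl
      (fun p ix => PySem.List.pySetD p (ix.1 + 1) (PySem.List.pyGetD p ix.1 0 + ix.2))
      ((acc ++ [s]) ++ List.replicate xs.length 0)
      = acc ++ preList s xs := by
  induction xs with
  | nil => intro acc s; simp [preList, PySem.List.enumerate]
  | cons x xs ih =>
    intro acc s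
    rw [PySem.List.enumerate_cons]
    simp only [List.foldl_cons, List.length_cons]
    have hget : PySem.List.pyGetD ((acc ++ [s]) ++ (List.replicate (xs.length + 1) 0)) (acc.length : Int) 0 = s := by
      simp
    have hset : PySem.List.pySetD ((acc ++ [s]) ++ (List.replicate (xs.length + 1) 0)) ((acc.length : Int) + 1) (s + x)
        = ((acc ++ [s]) ++ [s + x]) ++ List.replicate xs.length 0 := by
      have : ((acc.length : Int) + 1) = (((acc ++ [s]).length : Nat) : Int) := by simp
      rw [this, PySem.List.pySetD_natCast]
      rw [show List.replicate (xs.length + 1) (0:Int) = (0:Int) :: List.replicate xs.length 0 from rfl]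
      rw [List.set_append_right _ _ (by simp)]
      simp
    rw [hget, hset]
    have := ih (acc ++ [s]) (s + x)
    simp only [List.length_append, List.length_cons, List.length_nil, Nat.zero_add] at this ⊢
    push_cast at this ⊢
    rw [this]
    simp [preList]

theorem blk_eq (P : List Int) (b L : Int) (acc : List (Int × Int)) :
    (PySem.List.pyRange 0 (b - L) 1).foldl
      (fun acc2 i =>
        if PySem.List.pyGetD P (i + L) 0 - PySem.List.pyGetD P i 0 ≤ 0
        then acc2 ++ [(i, i + L)] else acc2) acc
    = acc ++ blk P b L := by
  rw [PySem.List.foldl_append_ite]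
  congr 1
  unfold blk
  rw [PySem.List.pyRange_one 0 (b - L), PySem.List.pyRange_one L b]
  rw [List.filter_map, List.filter_map, List.map_map, List.map_map]
  rw [show (b - L - 0).toNat = (b - L).toNat by omega]
  rw [List.filter_congr (q := (fun r => badAt P L r) ∘ fun k : Nat => L + (k : Int))
    (fun k _ => by
      simp only [Function.comp_apply, badAt]
      rw [show (0:Int) + (k:Int) + L = L + k from by ring,
          show L + (k:Int) - L = (0:Int) + k from by ring])]
  exact List.map_congr_left (fun k _ => by
    simp only [Function.comp_apply, Prod.mk.injEq]
    constructor <;> ring)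

theorem mem_grp {P : List Int} {r : Int} {e : Int × Int} :
    e ∈ grp P r ↔ ∃ L, (L = 3 ∨ L = 4 ∨ L = 5) ∧ 0 ≤ r - L ∧ badAt P L r ∧ e = (r - L, r) := by
  simp only [grp, List.mem_filterMap, List.mem_cons]
  constructor
  · rintro ⟨L, hL, h⟩
    split at h
    · exact ⟨L, by tauto, by tauto, by tauto, by simpa using h.symm⟩
    · simp at h
  · rintro ⟨L, h1, h2, h3, h4⟩
    refine ⟨L, by tauto, ?_⟩
    rw [if_pos ⟨h2, h3⟩, h4]

theorem grp_props {P : List Int} {r : Int} {e : Int × Int} (h : e ∈ grp P r) :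
    e.2 = r ∧ 0 ≤ e.1 ∧ e.1 + 3 ≤ r := by
  rcases mem_grp.mp h with ⟨L, hL, h0, _, he⟩
  subst he
  rcases hL with h | h | h <;> subst h <;> simp <;> omega

theorem cond_iff (P : List Int) (r c : Int) (h3 : 3 ≤ r) :
    ((c < r - 3 ∧ PySem.List.pyGetD P r 0 - PySem.List.pyGetD P (r - 3) 0 ≤ 0)
     ∨ (r ≥ 4 ∧ c < r - 4 ∧ PySem.List.pyGetD P r 0 - PySem.List.pyGetD P (r - 4) 0 ≤ 0)
     ∨ (r ≥ 5 ∧ c < r - 5 ∧ PySem.List.pyGetD P r 0 - PySem.List.pyGetD P (r - 5) 0 ≤ 0))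
      ↔ ∃ e ∈ grp P r, c < e.1 := by
  constructor
  · rintro (⟨hc, hb⟩ | ⟨h4, hc, hb⟩ | ⟨h5, hc, hb⟩)
    · exact ⟨(r - 3, r), mem_grp.mpr ⟨3, by tauto, by omega, by simp [badAt, hb], rfl⟩, hc⟩
    · exact ⟨(r - 4, r), mem_grp.mpr ⟨4, by tauto, by omega, by simp [badAt, hb], rfl⟩, hc⟩
    · exact ⟨(r - 5, r), mem_grp.mpr ⟨5, by tauto, by omega, by simp [badAt, hb], rfl⟩, hc⟩
  · rintro ⟨e, he, hc⟩
    rcases mem_grp.mp he with ⟨L, hL, h0, hb, he'⟩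
    subst he'
    simp only [badAt, decide_eq_true_eq] at hb
    rcases hL with h | h | h <;> subst h
    · exact Or.inl ⟨hc, hb⟩
    · exact Or.inr (Or.inl ⟨by omega, hc, hb⟩)
    · exact Or.inr (Or.inr ⟨by omega, hc, hb⟩)

theorem grp_eq_elt (P : List Int) (r : Int) :
    grp P r = elt P r 3 ++ elt P r 4 ++ elt P r 5 := by
  simp only [grp, elt, List.filterMap_cons, List.filterMap_nil]
  split_ifs <;> simp

theorem blk_succ (P : List Int) (L b : Int) :
    blk P (b + 1) L = blk P b L ++ elt P b L := by
  by_cases h : L ≤ b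
  · rw [blk, PySem.List.pyRange_one_succ_right h, List.filter_append, List.map_append]
    congr 1
    simp only [elt, List.filter_cons, List.filter_nil]
    by_cases hb : badAt P L b
    · rw [if_pos hb, if_pos ⟨by omega, hb⟩]; simp
    · rw [if_neg (by simp [hb]), if_neg (by tauto)]; simp
  · rw [blk, blk, PySem.List.pyRange_one_eq_nil (by omega), PySem.List.pyRange_one_eq_nil (by omega)]
    have he : elt P b L = [] := by rw [elt, if_neg (by rintro ⟨h1, -⟩; omega)]
    simp [he]

theorem mergedL_succ (P : List Int) (b : Int) :
    mergedL P (b + 1) = mergedL P b ++ grp P b := by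
  by_cases h : 3 ≤ b
  · rw [mergedL, PySem.List.pyRange_one_succ_right h, List.flatMap_append]
    simp [mergedL]
  · rw [mergedL, mergedL, PySem.List.pyRange_one_eq_nil (by omega), PySem.List.pyRange_one_eq_nil (by omega)]
    have : grp P b = [] := by
      rw [grp_eq_elt]
      simp only [elt]
      rw [if_neg (by rintro ⟨h1, -⟩; omega), if_neg (by rintro ⟨h1, -⟩; omega), if_neg (by rintro ⟨h1, -⟩; omega)]
      simp
    simp [this]

theorem shuffle {α : Type} [DecidableEq α] (a1 b1 a2 b2 a3 b3 : List α) :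
    ((a1 ++ b1) ++ (a2 ++ b2) ++ (a3 ++ b3)).Perm ((a1 ++ a2 ++ a3) ++ (b1 ++ b2 ++ b3)) := by
  apply List.perm_iff_count.mpr
  intro a
  simp [List.count_append]
  ring

theorem merged_perm_aux (P : List Int) : ∀ (k : Nat) (b : Int), b ≤ 3 + k →
    (blk P b 3 ++ blk P b 4 ++ blk P b 5).Perm (mergedL P b) := by
  intro k
  induction k with
  | zero =>
    intro b hb
    rw [blk, blk, blk, mergedL]
    have h3 : PySem.List.pyRange 3 b 1 = [] := PySem.List.pyRange_one_eq_nil (by omega)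
    have h4 : PySem.List.pyRange 4 b 1 = [] := PySem.List.pyRange_one_eq_nil (by omega)
    have h5 : PySem.List.pyRange 5 b 1 = [] := PySem.List.pyRange_one_eq_nil (by omega)
    rw [h3, h4, h5]
    simp
  | succ k ih =>
    intro b hb
    by_cases h : b ≤ 3 + k
    · exact ih b h
    · have hb' : b = (3 + k + 1 : Int) := by push_cast at hb ⊢; omega
      subst hb'
      rw [blk_succ, blk_succ, blk_succ, mergedL_succ, grp_eq_elt]
      exact (shuffle _ _ _ _ _ _).trans (((ih _ le_rfl).append_right _))

theorem merged_perm (P : List Int) (b : Int) :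
    (blk P b 3 ++ blk P b 4 ++ blk P b 5).Perm (mergedL P b) := by
  by_cases h : b ≤ 3
  · exact merged_perm_aux P 0 b (by omega)
  · exact merged_perm_aux P (b - 3).toNat b (by omega)

theorem mem_merged {P : List Int} {b : Int} {e : Int × Int} (h : e ∈ mergedL P b) :
    e.1 + 3 ≤ e.2 ∧ e.2 < b ∧ 0 ≤ e.1 := by
  rcases List.mem_flatMap.mp h with ⟨r, hr, he⟩
  rcases PySem.List.mem_pyRange_one.mp hr with ⟨h3, hb⟩
  have := grp_props he
  omega

theorem merged_pairwise (P : List Int) (b : Int) :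
    (mergedL P b).Pairwise (fun p q : Int × Int => p.2 ≤ q.2) := by
  by_cases hb : b ≤ 3
  · rw [mergedL, PySem.List.pyRange_one_eq_nil (by omega)]; simp
  · have : ∀ (k : Nat) (c : Int), c ≤ 3 + k → (mergedL P c).Pairwise (fun p q : Int × Int => p.2 ≤ q.2) := by
      intro k
      induction k with
      | zero => intro c hc; rw [mergedL, PySem.List.pyRange_one_eq_nil (by omega)]; simp
      | succ k ih =>
        intro c hc
        by_cases h : c ≤ 3 + k
        · exact ih c h
        · have hc' : c = (3 + k + 1 : Int) := by push_cast at hc ⊢; omega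
          subst hc'
          have hstep : mergedL P (3 + (k:Int) + 1) = mergedL P (3 + k) ++ grp P (3 + k) := by
            rw [mergedL, mergedL, PySem.List.pyRange_one_succ_right (by omega), List.flatMap_append]
            simp
          rw [hstep]
          rw [List.pairwise_append]
          refine ⟨ih _ le_rfl, ?_, ?_⟩
          · apply List.pairwise_of_forall_mem_list
            intro p hp q hq
            rw [(grp_props hp).1, (grp_props hq).1]
          · intro p hp q hq
            have h1 := (mem_merged hp).2.1
            have h2 := (grp_props hq).1
            omega
    exact this (b - 3).toNat b (by omega)

theorem foldl_gstep_covered : ∀ (g : List (Int × Int)) (last ops : Int),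
    (∀ e ∈ g, e.1 ≤ last ∧ last < e.2) →
    g.foldl gstep (last, ops) = (last, ops) := by
  intro g
  induction g with
  | nil => intro last ops _; rfl
  | cons e t ih =>
    intro last ops h
    have he := h e (by simp)
    simp only [List.foldl_cons, gstep]
    rw [if_neg (not_not_intro he)]
    exact ih last ops (fun x hx => h x (by simp [hx]))

theorem foldl_gstep_group : ∀ (g : List (Int × Int)) (r last ops : Int),
    (∀ e ∈ g, e.2 = r ∧ e.1 + 3 ≤ r) →
    g.foldl gstep (last, ops)
      = if g.any (fun e => decide (¬ (e.1 ≤ last ∧ last < e.2)))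
        then (r - 1, ops + 1) else (last, ops) := by
  intro g
  induction g with
  | nil => intro r last ops _; simp
  | cons e t ih =>
    intro r last ops h
    have he := h e (by simp)
    simp only [List.foldl_cons, gstep]
    by_cases hc : e.1 ≤ last ∧ last < e.2
    · rw [if_neg (not_not_intro hc)]
      rw [ih r last ops (fun x hx => h x (by simp [hx]))]
      have hfe : (decide (¬ (e.1 ≤ last ∧ last < e.2))) = false := by simp [hc.1, hc.2]
      simp only [List.any_cons, hfe, Bool.false_or]
    · rw [if_pos hc]
      have hcov : t.foldl gstep (e.2 - 1, ops + 1) = (e.2 - 1, ops + 1) := by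
        apply foldl_gstep_covered
        intro x hx
        have hx' := h x (by simp [hx])
        have := he.1
        constructor <;> omega
      rw [hcov, if_pos]
      · rw [he.1]
      · simp only [List.any_cons, Bool.or_eq_true, decide_eq_true_eq]
        left; exact hc

theorem filter_snd_prefix : ∀ (l : List (Int × Int)) (r : Int),
    l.Pairwise (fun p q : Int × Int => p.2 ≤ q.2) → (∀ x ∈ l, r ≤ x.2) →
    l = l.filter (fun x => decide (x.2 = r)) ++ l.filter (fun x => ! decide (x.2 = r)) := by
  intro l
  induction l with
  | nil => intro r _ _; rfl
  | cons x t ih =>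
    intro r hp hge
    rcases List.pairwise_cons.mp hp with ⟨hx, ht⟩
    by_cases hxr : x.2 = r
    · simp only [List.filter_cons, hxr, decide_true, Bool.not_true, Bool.false_eq_true, if_false, if_true]
      simpa using ih r ht (fun y hy => hge y (by simp [hy]))
    · have hgt : r < x.2 := lt_of_le_of_ne (hge x (by simp)) (Ne.symm hxr)
      have hnone : t.filter (fun y => decide (y.2 = r)) = [] := by
        rw [List.filter_eq_nil_iff]
        intro y hy
        have := hx y hy
        simp only [decide_eq_true_eq]
        omega
      simp only [List.filter_cons, hxr, decide_false, Bool.not_false, if_true, Bool.false_eq_true, if_false]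
      rw [hnone]
      have : t.filter (fun y => ! decide (y.2 = r)) = t := by
        rw [List.filter_eq_self]
        intro y hy
        have := hx y hy
        simp only [Bool.not_eq_eq_eq_not, Bool.not_true, decide_eq_false_iff_not]
        omega
      rw [this]
      rfl

theorem foldl_gstep_perm : ∀ (N : Nat) (l₁ l₂ : List (Int × Int)) (st : Int × Int),
    l₁.length ≤ N → l₁.Perm l₂ →
    l₁.Pairwise (fun p q : Int × Int => p.2 ≤ q.2) →
    l₂.Pairwise (fun p q : Int × Int => p.2 ≤ q.2) →
    (∀ e ∈ l₁, e.1 + 3 ≤ e.2) →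
    l₁.foldl gstep st = l₂.foldl gstep st := by
  intro N
  induction N with
  | zero =>
    intro l₁ l₂ st hN hp _ _ _
    have h1 : l₁ = [] := List.eq_nil_of_length_eq_zero (by omega)
    subst h1
    rw [hp.nil_eq]  -- l₂ = []
  | succ N ih =>
    intro l₁ l₂ st hN hperm hp1 hp2 h3
    cases l₁ with
    | nil => rw [hperm.nil_eq]
    | cons e t =>
      set l₁ := e :: t with hl₁
      have hel₁ : e ∈ l₁ := by simp [hl₁]
      set r := e.2 with hr
      -- every element of l₁ (and l₂) has snd ≥ r
      have hge1 : ∀ x ∈ l₁, r ≤ x.2 := by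
        intro x hx
        rcases (List.mem_cons.mp hx) with h | h
        · rw [h]
        · exact List.rel_of_pairwise_cons hp1 h
      have hge2 : ∀ x ∈ l₂, r ≤ x.2 := fun x hx => hge1 x (hperm.symm.subset hx)
      -- split both at snd = r
      have e1 := filter_snd_prefix l₁ r hp1 hge1
      have e2 := filter_snd_prefix l₂ r hp2 hge2
      set G₁ := l₁.filter (fun x => decide (x.2 = r)) with hG₁
      set T₁ := l₁.filter (fun x => ! decide (x.2 = r)) with hT₁
      set G₂ := l₂.filter (fun x => decide (x.2 = r)) with hG₂
      set T₂ := l₂.filter (fun x => ! decide (x.2 = r)) with hT₂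
      have hGperm : G₁.Perm G₂ := hperm.filter _
      have hTperm : T₁.Perm T₂ := hperm.filter _
      rw [e1, e2, List.foldl_append, List.foldl_append]
      -- the two group folds agree
      have hGmem : ∀ x ∈ G₁, x.2 = r ∧ x.1 + 3 ≤ r := by
        intro x hx
        rw [hG₁, List.mem_filter] at hx
        have := h3 x hx.1
        have h2 := of_decide_eq_true hx.2
        omega
      have hGmem₂ : ∀ x ∈ G₂, x.2 = r ∧ x.1 + 3 ≤ r := fun x hx => hGmem x (hGperm.symm.subset hx)
      obtain ⟨last, ops⟩ := st
      have hg1 := foldl_gstep_group G₁ r last ops hGmem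
      have hg2 := foldl_gstep_group G₂ r last ops hGmem₂
      have hany : G₁.any (fun e => decide (¬ (e.1 ≤ last ∧ last < e.2)))
          = G₂.any (fun e => decide (¬ (e.1 ≤ last ∧ last < e.2))) := by
        apply Bool.eq_iff_iff.mpr
        rw [List.any_eq_true, List.any_eq_true]
        exact ⟨fun ⟨x, hx, hxx⟩ => ⟨x, hGperm.mem_iff.mp hx, hxx⟩,
               fun ⟨x, hx, hxx⟩ => ⟨x, hGperm.mem_iff.mpr hx, hxx⟩⟩
      rw [hg1, hg2, hany]
      -- recurse on the tails
      have hlen : T₁.length < l₁.length := by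
        have hGne : G₁ ≠ [] := by
          intro hnil
          have : e ∈ G₁ := by
            rw [hG₁, List.mem_filter]
            exact ⟨hel₁, by simp [hr]⟩
          rw [hnil] at this; simp at this
        have := congrArg List.length e1
        rw [List.length_append] at this
        have hGpos : 0 < G₁.length := List.length_pos_iff.mpr hGne
        omega
      have hT1p : T₁.Pairwise (fun p q : Int × Int => p.2 ≤ q.2) := hp1.sublist List.filter_sublist
      have hT2p : T₂.Pairwise (fun p q : Int × Int => p.2 ≤ q.2) := hp2.sublist List.filter_sublist
      have hT3 : ∀ x ∈ T₁, x.1 + 3 ≤ x.2 := fun x hx => h3 x (List.filter_sublist.subset hx)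
      exact ih T₁ T₂ _ (by omega) hTperm hT1p hT2p hT3

theorem foldl_flatMap_group (P : List Int) : ∀ (rs : List Int) (st : Int × Int),
    (rs.flatMap (grp P)).foldl gstep st = rs.foldl (fun st r => (grp P r).foldl gstep st) st := by
  intro rs
  induction rs with
  | nil => intro st; rfl
  | cons r t ih => intro st; rw [List.flatMap_cons, List.foldl_append, List.foldl_cons, ih]

-- the uncovered-test and B's test agree once last < r
theorem grp_any_iff (P : List Int) (r last : Int) (h3 : 3 ≤ r) (hlt : last < r) :
    ((grp P r).any (fun e => decide (¬ (e.1 ≤ last ∧ last < e.2))) = true)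
      ↔ ((last < r - 3 ∧ PySem.List.pyGetD P r 0 - PySem.List.pyGetD P (r - 3) 0 ≤ 0)
     ∨ (r ≥ 4 ∧ last < r - 4 ∧ PySem.List.pyGetD P r 0 - PySem.List.pyGetD P (r - 4) 0 ≤ 0)
     ∨ (r ≥ 5 ∧ last < r - 5 ∧ PySem.List.pyGetD P r 0 - PySem.List.pyGetD P (r - 5) 0 ≤ 0)) := by
  rw [List.any_eq_true, cond_iff P r last h3]
  constructor
  · rintro ⟨e, he, hx⟩
    refine ⟨e, he, ?_⟩
    have hr := (grp_props he).1
    simp only [decide_eq_true_eq] at hx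
    subst hr
    omega
  · rintro ⟨e, he, hx⟩
    refine ⟨e, he, ?_⟩
    simp only [decide_eq_true_eq]
    intro hc
    omega

theorem cp1 (P : List Int) : ∀ (rs : List Int) (last ops : Int),
    rs.Pairwise (· < ·) → (∀ r ∈ rs, last < r) → (∀ r ∈ rs, 3 ≤ r) →
    rs.foldl (fun st r => (grp P r).foldl gstep st) (last, ops) = rs.foldl (bstep P) (last, ops) := by
  intro rs
  induction rs with
  | nil => intro last ops _ _ _; rfl
  | cons r t ih =>
    intro last ops hp hlt h3s
    rcases List.pairwise_cons.mp hp with ⟨hr, ht⟩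
    have hlr : last < r := hlt r (by simp)
    have h3 : 3 ≤ r := h3s r (by simp)
    simp only [List.foldl_cons]
    have hgmem : ∀ e ∈ grp P r, e.2 = r ∧ e.1 + 3 ≤ r := fun e he =>
      ⟨(grp_props he).1, (grp_props he).2.2⟩
    rw [foldl_gstep_group _ r last ops hgmem]
    have hbs : bstep P (last, ops) r =
        if ((last < r - 3 ∧ PySem.List.pyGetD P r 0 - PySem.List.pyGetD P (r - 3) 0 ≤ 0)
            ∨ (r ≥ 4 ∧ last < r - 4 ∧ PySem.List.pyGetD P r 0 - PySem.List.pyGetD P (r - 4) 0 ≤ 0)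
            ∨ (r ≥ 5 ∧ last < r - 5 ∧ PySem.List.pyGetD P r 0 - PySem.List.pyGetD P (r - 5) 0 ≤ 0))
        then (r - 1, ops + 1) else (last, ops) := rfl
    rw [hbs]
    by_cases hc : ((last < r - 3 ∧ PySem.List.pyGetD P r 0 - PySem.List.pyGetD P (r - 3) 0 ≤ 0)
            ∨ (r ≥ 4 ∧ last < r - 4 ∧ PySem.List.pyGetD P r 0 - PySem.List.pyGetD P (r - 4) 0 ≤ 0)
            ∨ (r ≥ 5 ∧ last < r - 5 ∧ PySem.List.pyGetD P r 0 - PySem.List.pyGetD P (r - 5) 0 ≤ 0))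
    · rw [if_pos ((grp_any_iff P r last h3 hlr).mpr hc), if_pos hc]
      exact ih (r - 1) (ops + 1) ht (fun x hx => by have := hr x hx; omega)
        (fun x hx => by have := hr x hx; omega)
    · rw [if_neg (fun hh => hc ((grp_any_iff P r last h3 hlr).mp hh)), if_neg hc]
      exact ih last ops ht (fun x hx => by have := hr x hx; omega)
        (fun x hx => by have := hr x hx; omega)

theorem cp0 (P : List Int) : ∀ (rs : List Int) (ops : Int),
    rs.Pairwise (· < ·) → (∀ r ∈ rs, 3 ≤ r ∧ r ≤ 10 ^ 10) →
    (rs.foldl (fun st r => (grp P r).foldl gstep st) (10 ^ 10, ops)).2 = (rs.foldl (bstep P) (-1, ops)).2 := by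
  intro rs
  induction rs with
  | nil => intro ops _ _; rfl
  | cons r t ih =>
    intro ops hp hb
    rcases List.pairwise_cons.mp hp with ⟨hr, ht⟩
    have hrb := hb r (by simp)
    simp only [List.foldl_cons]
    have hgmem : ∀ e ∈ grp P r, e.2 = r ∧ e.1 + 3 ≤ r := fun e he =>
      ⟨(grp_props he).1, (grp_props he).2.2⟩
    rw [foldl_gstep_group _ r _ ops hgmem]
    -- with last = 10^10 every group element is uncovered; with covered = -1 likewise
    have hA : (grp P r).any (fun e => decide (¬ (e.1 ≤ (10:Int) ^ 10 ∧ (10:Int) ^ 10 < e.2)))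
        = !(grp P r).isEmpty := by
      cases hgg : grp P r with
      | nil => simp
      | cons e g =>
        simp only [List.isEmpty_cons, Bool.not_false, List.any_cons, Bool.or_eq_true_iff]
        left
        simp only [decide_eq_true_eq]
        have := grp_props (show e ∈ grp P r by simp [hgg])
        intro hc
        have := hc.2
        omega
    have hBc : ((-1 < r - 3 ∧ PySem.List.pyGetD P r 0 - PySem.List.pyGetD P (r - 3) 0 ≤ 0)
            ∨ (r ≥ 4 ∧ -1 < r - 4 ∧ PySem.List.pyGetD P r 0 - PySem.List.pyGetD P (r - 4) 0 ≤ 0)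
            ∨ (r ≥ 5 ∧ -1 < r - 5 ∧ PySem.List.pyGetD P r 0 - PySem.List.pyGetD P (r - 5) 0 ≤ 0))
        ↔ ¬ (grp P r).isEmpty := by
      rw [cond_iff P r (-1) hrb.1]
      constructor
      · rintro ⟨e, he, -⟩
        intro hemp
        rw [List.isEmpty_iff.mp hemp] at he
        simp at he
      · intro hne
        cases hgg : grp P r with
        | nil => rw [hgg] at hne; simp at hne
        | cons e' g =>
          refine ⟨e', by simp, ?_⟩
          have := grp_props (show e' ∈ grp P r from hgg ▸ List.mem_cons_self)
          omega
    rw [hA]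
    have hbs : bstep P (-1, ops) r =
        if ((-1 < r - 3 ∧ PySem.List.pyGetD P r 0 - PySem.List.pyGetD P (r - 3) 0 ≤ 0)
            ∨ (r ≥ 4 ∧ -1 < r - 4 ∧ PySem.List.pyGetD P r 0 - PySem.List.pyGetD P (r - 4) 0 ≤ 0)
            ∨ (r ≥ 5 ∧ -1 < r - 5 ∧ PySem.List.pyGetD P r 0 - PySem.List.pyGetD P (r - 5) 0 ≤ 0))
        then (r - 1, ops + 1) else (-1, ops) := rfl
    rw [hbs]
    by_cases hne : (grp P r).isEmpty
    · rw [if_neg (show ¬ ((!(grp P r).isEmpty) = true) by simp [hne]),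
          if_neg (fun hh => (hBc.mp hh) hne)]
      exact ih ops ht (fun x hx => hb x (by simp [hx]))
    · rw [if_pos (show (!(grp P r).isEmpty) = true by simp [hne]), if_pos (hBc.mpr hne)]
      rw [cp1 P t (r - 1) (ops + 1) ht (fun x hx => by have := hr x hx; omega)
        (fun x hx => by have := hr x hx; have := (hb x (by simp [hx])).1; omega)]

theorem makeArrayPositive_main (nums : List Int) (hpre : (nums.length : Int) ≤ 10 ^ 10) :
    makeArrayPositive nums = makeArrayPositive_alt nums := by
  unfold makeArrayPositive makeArrayPositive_alt
  simp only [PySem.List.len_eq]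
  -- identify the two prefix lists
  have hPA : (PySem.List.enumerate nums 0).foldl
      (fun p ix => PySem.List.pySetD p (ix.1 + 1) (PySem.List.pyGetD p ix.1 0 + ix.2))
      (List.replicate (nums.length + 1) 0) = preList 0 nums := by
    have h := prefA_eq nums [] 0
    simpa [List.replicate_succ] using h
  have hPB : (nums.foldl (fun (p : List Int × Int) x => (p.1 ++ [p.2 + x], p.2 + x)) ([0], 0)).1
      = preList 0 nums := by
    have h := prefB_eq nums [] 0
    simpa using h
  rw [hPA, hPB]
  set P := preList 0 nums with hP
  set n : Int := (nums.length : Int) with hn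
  -- identify A's bad list
  have hshift : ∀ L : Int, n - L + 1 = n + 1 - L := by intro L; ring
  simp only [List.foldl_cons, List.foldl_nil]
  rw [hshift 3, hshift 4, hshift 5, blk_eq P (n+1) 3, blk_eq P (n+1) 4, blk_eq P (n+1) 5]
  simp only [List.nil_append]
  set badL := blk P (n+1) 3 ++ blk P (n+1) 4 ++ blk P (n+1) 5 with hbadL
  -- the right-hand side (B's value), shared by both branches below
  have hBfold : (PySem.List.pyRange 3 (n + 1) 1).foldl
        (fun (st : Int × Int) r =>
          let pr := PySem.List.pyGetD P r 0
          if (st.1 < r - 3 ∧ pr - PySem.List.pyGetD P (r - 3) 0 ≤ 0)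
             ∨ (r ≥ 4 ∧ st.1 < r - 4 ∧ pr - PySem.List.pyGetD P (r - 4) 0 ≤ 0)
             ∨ (r ≥ 5 ∧ st.1 < r - 5 ∧ pr - PySem.List.pyGetD P (r - 5) 0 ≤ 0)
          then (r - 1, st.2 + 1) else st) (-1, 0)
      = (PySem.List.pyRange 3 (n + 1) 1).foldl (bstep P) (-1, 0) := rfl
  rw [hBfold]
  have hcp := cp0 P (PySem.List.pyRange 3 (n + 1) 1) 0
    (PySem.List.pairwise_lt_pyRange_one _ _)
    (by
      intro r hr
      rcases PySem.List.mem_pyRange_one.mp hr with ⟨h1, h2⟩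
      constructor
      · omega
      · omega)
  rw [← hcp]
  rw [← foldl_flatMap_group P (PySem.List.pyRange 3 (n + 1) 1) ((10:Int) ^ 10, 0)]
  show _ = (List.foldl gstep ((10:Int)^10, 0) (mergedL P (n+1))).2
  by_cases hbad : badL = []
  · rw [if_pos hbad]
    have hperm := merged_perm P (n+1)
    rw [← hbadL, hbad] at hperm
    have hm : mergedL P (n+1) = [] := hperm.nil_eq.symm
    rw [hm]
    rfl
  · rw [if_neg hbad]
    have hsp : (PySem.List.sorted badL (fun x : Int × Int => x.2) false).Perm (mergedL P (n+1)) :=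
      (PySem.List.sorted_perm _ _ _).trans (merged_perm P (n+1))
    have hgfold : (PySem.List.sorted badL (fun x : Int × Int => x.2) false).foldl gstep ((10:Int)^10, 0)
        = (mergedL P (n+1)).foldl gstep ((10:Int)^10, 0) := by
      apply foldl_gstep_perm (PySem.List.sorted badL (fun x : Int × Int => x.2) false).length _ _ _ le_rfl hsp
      · exact PySem.List.sorted_pairwise _ _
      · exact merged_pairwise P (n+1)
      · intro e he
        exact (mem_merged (hsp.subset he)).1
    show (List.foldl (fun (st : Int × Int) e =>
          if ¬ (e.1 ≤ st.1 ∧ st.1 < e.2) then (e.2 - 1, st.2 + 1) else st) ((10:Int)^10, 0)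
          (PySem.List.sorted badL (fun x : Int × Int => x.2) false)).2 = _
    rw [show (fun (st : Int × Int) e =>
          if ¬ (e.1 ≤ st.1 ∧ st.1 < e.2) then (e.2 - 1, st.2 + 1) else st) = gstep from rfl]
    rw [hgfold]

-- ===== VERDICT (by name: the statement is the Claim_ definition above) =====
theorem makeArrayPositive_spec : Claim_equal_makeArrayPositive := by
  intro nums _ hpre
  unfold Pre_makeArrayPositive at hpre
  unfold Spec_makeArrayPositive
  exact makeArrayPositive_main nums hpre
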